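-- pv_equiv track=rewrite | github.com/MariiaKandaurova/AOIS | AOIS_LW1/final_basic_operations.py | add_two_complements
-- ===== SOURCE A (Python) =====
-- def convert_to_twos_complement(input_num, check_negative=True):
--     if isinstance(input_num, str):
--         try:
--             input_num = int(input_num)
--         except ValueError:
--             return "Ошибка: входное значение должно быть числом или строкой, представляющей число."
--     negative_num = abs(input_num)
--     incremental_figure = 1
--     reverse_result = ''
--     result_of_translation = ''
--
--     while negative_num > 0:
--         reverse_result = str(negative_num % 2) + reverse_result
--         negative_num //= 2
--
--     reverse_result = reverse_result.zfill(8)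
--
--     if check_negative and input_num < 0:
--         not_reverse_result = reverse_result.translate(str.maketrans('01', '10'))
--
--         final_reverse_result = not_reverse_result
--         for index in range(len(final_reverse_result) - 1, -1, -1):
--             if final_reverse_result[index] == '1' and incremental_figure == 1:
--                 result_of_translation = '0' + result_of_translation
--             elif final_reverse_result[index] == '0' and incremental_figure == 1:
--                 result_of_translation = '1' + result_of_translation
--                 incremental_figure = 0
--             else:
--                 result_of_translation = final_reverse_result[index] + result_of_translation
--
--         if incremental_figure == 1:
--             result_of_translation = '1' + result_of_translation
--     else:
--         result_of_translation = reverse_result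
--
--     result_of_translation = result_of_translation.zfill(8)
--
--     return result_of_translation
--
-- def add_two_complements(first_term_value, second_term_value, mode='twos_complement'):
--     first_term = first_term_value
--     second_term = second_term_value
--     if mode == 'twos_complement':
--         first_term = convert_to_twos_complement(first_term_value)
--         second_term = convert_to_twos_complement(second_term_value)
--     elif mode == 'direct_code':
--         pass
--
--     sum_of_two_digit = ''
--     carry = '0'
--
--     for index1, index2 in zip(reversed(first_term), reversed(second_term)):
--         ones_count = sum([index1 == '1', index2 == '1', carry == '1'])
--         if ones_count == 0:
--             sum_of_two_digit = '0' + sum_of_two_digit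
--             carry = '0'
--         elif ones_count == 1:
--             sum_of_two_digit = '1' + sum_of_two_digit
--             carry = '0'
--         elif ones_count == 2:
--             sum_of_two_digit = '0' + sum_of_two_digit
--             carry = '1'
--         else:
--             sum_of_two_digit = '1' + sum_of_two_digit
--             carry = '1'
--
--     if carry == '1':
--         sum_of_two_digit = '1' + sum_of_two_digit
--
--     sum_of_two_digit = sum_of_two_digit[-8:]
--
--     return sum_of_two_digit
-- ===== SOURCE B (Python) =====
-- def add_two_complements(first_term_value, second_term_value, mode='twos_complement'):
--     if mode != 'twos_complement':
--         # with int arguments only two's-complement addition is meaningful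
--         raise ValueError('unsupported mode: %r' % (mode,))
--     total = (first_term_value + second_term_value) % 256
--     return ''.join('1' if total & (1 << i) else '0' for i in range(7, -1, -1))
-- ===== Notes on version B (the rewrite author's own statement) =====
-- stated objective: simpler
-- what changed: Replaces the digit-string conversion pipeline (binary-string building, bit-flip translate, increment loop, character ripple-carry addition, slicing) with one modular integer addition (a+b) % 256 formatted as 8 bits, correct because both two's-complement encodings are congruent to their inputs mod 256 and only the last 8 characters are returned.
import Mathlib
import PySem

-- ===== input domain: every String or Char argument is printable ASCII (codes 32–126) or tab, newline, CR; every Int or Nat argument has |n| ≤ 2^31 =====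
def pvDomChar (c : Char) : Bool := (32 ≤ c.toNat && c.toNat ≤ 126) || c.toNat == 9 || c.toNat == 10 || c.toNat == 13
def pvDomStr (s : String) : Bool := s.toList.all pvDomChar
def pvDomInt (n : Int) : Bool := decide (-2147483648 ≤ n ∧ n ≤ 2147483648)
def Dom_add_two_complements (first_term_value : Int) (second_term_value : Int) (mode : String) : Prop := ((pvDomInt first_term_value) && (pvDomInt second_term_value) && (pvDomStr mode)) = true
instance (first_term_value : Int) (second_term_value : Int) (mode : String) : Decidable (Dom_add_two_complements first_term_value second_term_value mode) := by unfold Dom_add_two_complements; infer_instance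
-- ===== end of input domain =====

-- B replaces A's digit-string conversion/ripple-carry pipeline by one modular addition
-- (a+b) % 256 rendered as 8 bits (objective: simpler); for mode ≠ "twos_complement" both
-- raise (A a TypeError, B a ValueError) — those inputs are excluded by Pre_.


-- ===== PORT A =====

-- the `while negative_num > 0` loop: LSB computed first, prepended to the accumulator
def pvBitsAux : Nat → List Char → List Char
  | 0, acc => acc
  | m+1, acc => pvBitsAux ((m+1) / 2) ((if (m+1) % 2 = 1 then '1' else '0') :: acc)
  decreasing_by exact Nat.div_lt_self (Nat.succ_pos m) one_lt_two

-- .translate(str.maketrans('01', '10')) applied to one character (exact: other chars unchanged)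
def pvFlip (c : Char) : Char := if c = '0' then '1' else if c = '1' then '0' else c

-- the `for index in range(len-1, -1, -1)` +1 loop: structural recursion over the REVERSED
-- string (same iteration order, LSB first), each step prepending, carry flag threaded
def pvIncAux : List Char → Nat → List Char × Nat
  | [], f => ([], f)
  | c :: t, f =>
      let (b, f') :=
        if c = '1' ∧ f = 1 then ('0', 1)
        else if c = '0' ∧ f = 1 then ('1', 0)
        else (c, f)
      let (r, fo) := pvIncAux t f'
      (r ++ [b], fo)

-- convert_to_twos_complement with an int argument (the isinstance(str) branch never fires
-- here: both call sites pass the int parameters) and check_negative = True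
def pvConvert (input_num : Int) : List Char :=
  let negative_num := input_num.natAbs                          -- abs(input_num)
  let reverse_result := PySem.Chars.zfill (pvBitsAux negative_num []) 8
  let result_of_translation :=
    if input_num < 0 then
      let not_reverse_result := reverse_result.map pvFlip
      let p := pvIncAux not_reverse_result.reverse 1
      if p.2 = 1 then '1' :: p.1 else p.1
    else reverse_result
  PySem.Chars.zfill result_of_translation 8

-- one iteration of the ripple loop: (sum bit, new carry) from the pair and the old carry
def pvDigits (p : Char × Char) (carry : Char) : Char × Char :=
  let ones : Nat := (if p.1 = '1' then 1 else 0) + (if p.2 = '1' then 1 else 0)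
                    + (if carry = '1' then 1 else 0)
  if ones = 0 then ('0', '0')
  else if ones = 1 then ('1', '0')
  else if ones = 2 then ('0', '1')
  else ('1', '1')

def pvAddStep (st : List Char × Char) (p : Char × Char) : List Char × Char :=
  ((pvDigits p st.2).1 :: st.1, (pvDigits p st.2).2)

def add_two_complements (first_term_value : Int) (second_term_value : Int) (mode : String) : String :=
  if mode = "twos_complement" then
    let first_term := pvConvert first_term_value
    let second_term := pvConvert second_term_value
    -- for i1, i2 in zip(reversed(first_term), reversed(second_term)): …
    let q := (first_term.reverse.zip second_term.reverse).foldl pvAddStep ([], '0')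
    let sum_of_two_digit := if q.2 = '1' then '1' :: q.1 else q.1
    String.ofList (PySem.List.slice sum_of_two_digit (some (-8)) none)  -- [-8:]
  else
    -- Python: the terms stay ints and zip(reversed(first_term), …) raises TypeError;
    -- these inputs are excluded by Pre_add_two_complements
    ""

-- ===== PORT B =====

def add_two_complements_alt (first_term_value : Int) (second_term_value : Int) (mode : String) : String :=
  if mode = "twos_complement" then
    let total := PySem.Int.mod (first_term_value + second_term_value) 256
    String.ofList ((PySem.List.pyRange 7 (-1) (-1)).map
      (fun i => if PySem.Int.band total (1 <<< i.toNat) ≠ 0 then '1' else '0'))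
  else
    ""  -- Python B raises ValueError here; these inputs are excluded by Pre_add_two_complements

-- ===== PRECONDITION & SPEC =====

-- Pre_ excludes exactly the inputs where A raises: with int terms, any mode other than
-- 'twos_complement' leaves them unconverted and zip(reversed(int), …) raises TypeError.
def Pre_add_two_complements (first_term_value : Int) (second_term_value : Int) (mode : String) : Prop :=
  mode = "twos_complement"
instance (first_term_value : Int) (second_term_value : Int) (mode : String) : Decidable (Pre_add_two_complements first_term_value second_term_value mode) := by unfold Pre_add_two_complements; infer_instance

def pvWitness_add_two_complements : Int × Int × String := (3, -5, "twos_complement")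

def Spec_add_two_complements (first_term_value : Int) (second_term_value : Int) (mode : String) (out : String) : Prop := out = add_two_complements_alt first_term_value second_term_value mode
instance (first_term_value : Int) (second_term_value : Int) (mode : String) (out : String) : Decidable (Spec_add_two_complements first_term_value second_term_value mode out) := by unfold Spec_add_two_complements; infer_instance

-- ===== CLAIM (what is proved, stated in full; the proofs are below) =====
def Claim_equal_add_two_complements : Prop := ∀ (first_term_value : Int) (second_term_value : Int) (mode : String), Dom_add_two_complements first_term_value second_term_value mode → Pre_add_two_complements first_term_value second_term_value mode → Spec_add_two_complements first_term_value second_term_value mode (add_two_complements first_term_value second_term_value mode)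


-- ===== LEMMAS AND PROOFS =====

-- bit value of one character, Python's (c == '1')
def pvBitc (c : Char) : Nat := if c = '1' then 1 else 0

-- value of a bit list, least significant first
def pvValR : List Char → Nat
  | [] => 0
  | c :: t => pvBitc c + 2 * pvValR t

-- value of a bit string written most significant first (as all the port's strings are)
def pvVal (s : List Char) : Nat := pvValR s.reverse

def pvIsBin (l : List Char) : Prop := ∀ c ∈ l, c = '0' ∨ c = '1'

theorem pvBitc_le (c : Char) : pvBitc c ≤ 1 := by
  unfold pvBitc; split <;> omega

theorem pvBitc_zero : pvBitc '0' = 0 := by decide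

theorem pvBitc_one : pvBitc '1' = 1 := by decide

theorem pvValR_append (r r' : List Char) :
    pvValR (r ++ r') = pvValR r + 2 ^ r.length * pvValR r' := by
  induction r with
  | nil => simp [pvValR]
  | cons c t ih => simp [pvValR, ih, pow_succ]; ring

theorem pvValR_lt (r : List Char) : pvValR r < 2 ^ r.length := by
  induction r with
  | nil => simp [pvValR]
  | cons c t ih => have := pvBitc_le c; simp [pvValR, pow_succ]; omega

theorem pvVal_lt (s : List Char) : pvVal s < 2 ^ s.length := by
  simpa [pvVal] using pvValR_lt s.reverse

theorem pvVal_append_singleton (l : List Char) (c : Char) :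
    pvVal (l ++ [c]) = 2 * pvVal l + pvBitc c := by
  simp [pvVal, pvValR]; ring

theorem pvVal_cons (c : Char) (l : List Char) :
    pvVal (c :: l) = pvBitc c * 2 ^ l.length + pvVal l := by
  simp [pvVal, pvValR_append, pvValR]; ring

theorem pvValR_replicate_zero (k : Nat) : pvValR (List.replicate k '0') = 0 := by
  induction k with
  | zero => simp [pvValR]
  | succ n ih => simp [List.replicate_succ, pvValR, ih, pvBitc]

theorem pvVal_pad (k : Nat) (s : List Char) :
    pvVal (List.replicate k '0' ++ s) = pvVal s := by
  simp [pvVal, List.reverse_append, pvValR_append, pvValR_replicate_zero]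

-- binary lists of equal length and equal value are equal
theorem pvValR_inj : ∀ r1 r2 : List Char, pvIsBin r1 → pvIsBin r2 →
    r1.length = r2.length → pvValR r1 = pvValR r2 → r1 = r2 := by
  intro r1
  induction r1 with
  | nil => intro r2 _ _ hl _; cases r2 <;> simp_all
  | cons c t ih =>
      intro r2 hb1 hb2 hl hv
      cases r2 with
      | nil => simp_all
      | cons d u =>
          have hc := hb1 c (by simp)
          have hd := hb2 d (by simp)
          have h1 : pvBitc c = pvBitc d ∧ pvValR t = pvValR u := by
            have := pvBitc_le c; have := pvBitc_le d
            simp [pvValR] at hv; constructor <;> omega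
          have hcd : c = d := by
            rcases hc with h | h <;> rcases hd with h' | h' <;>
              simp_all [pvBitc]
          subst hcd
          have := ih u (fun x hx => hb1 x (by simp [hx])) (fun x hx => hb2 x (by simp [hx]))
            (by simpa using hl) h1.2
          simp [this]

theorem pvVal_inj (s1 s2 : List Char) (h1 : pvIsBin s1) (h2 : pvIsBin s2)
    (hl : s1.length = s2.length) (hv : pvVal s1 = pvVal s2) : s1 = s2 := by
  have := pvValR_inj s1.reverse s2.reverse
    (fun c hc => h1 c (by simpa using hc)) (fun c hc => h2 c (by simpa using hc))
    (by simpa using hl) hv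
  have := congrArg List.reverse this
  simpa using this


-- membership helpers
theorem pvIsBin_append {l1 l2 : List Char} (h1 : pvIsBin l1) (h2 : pvIsBin l2) :
    pvIsBin (l1 ++ l2) := by
  intro c hc; rcases List.mem_append.1 hc with h | h
  · exact h1 c h
  · exact h2 c h

theorem pvIsBin_replicate_zero (k : Nat) : pvIsBin (List.replicate k '0') := by
  intro c hc; left; exact (List.eq_of_mem_replicate hc)

theorem pvIsBin_reverse {l : List Char} (h : pvIsBin l) : pvIsBin l.reverse := by
  intro c hc; exact h c (by simpa using hc)

-- the binary-digits loop: accumulator-independence and its value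
theorem pvBitsAux_append (m : Nat) : ∀ acc, pvBitsAux m acc = pvBitsAux m [] ++ acc := by
  induction m using Nat.strong_induction_on with
  | _ m ih =>
    intro acc
    cases m with
    | zero => simp [pvBitsAux]
    | succ k =>
      have hlt := Nat.div_lt_self (Nat.succ_pos k) one_lt_two
      rw [pvBitsAux, pvBitsAux,
        ih _ hlt ((if (k+1) % 2 = 1 then '1' else '0') :: acc),
        ih _ hlt [(if (k+1) % 2 = 1 then '1' else '0')]]
      simp

theorem pvBits_spec (m : Nat) : pvVal (pvBitsAux m []) = m ∧ pvIsBin (pvBitsAux m []) := by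
  induction m using Nat.strong_induction_on with
  | _ m ih =>
    cases m with
    | zero =>
        constructor
        · simp [pvBitsAux, pvVal, pvValR]
        · intro c hc; simp [pvBitsAux] at hc
    | succ k =>
      have hlt := Nat.div_lt_self (Nat.succ_pos k) one_lt_two
      obtain ⟨hv, hb⟩ := ih _ hlt
      rw [pvBitsAux, pvBitsAux_append]
      refine ⟨?_, pvIsBin_append hb ?_⟩
      · rw [pvVal_append_singleton, hv]
        have hdm := Nat.div_add_mod (k+1) 2
        have hm2 : (k+1) % 2 < 2 := Nat.mod_lt _ (by omega)
        by_cases h : (k+1) % 2 = 1 <;> simp [h, pvBitc] <;> omega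
      · intro c hc
        by_cases h : (k+1) % 2 = 1 <;> simp [h] at hc <;> simp [hc]

-- zfill(8) on a sign-free (binary) string is a left pad with zeros
theorem pvZfill_eq (cs : List Char) (hb : pvIsBin cs) :
    PySem.Chars.zfill cs 8 = List.replicate (8 - cs.length) '0' ++ cs := by
  unfold PySem.Chars.zfill
  split
  · next h =>
      have : 8 ≤ cs.length := by exact_mod_cast h
      have h0 : 8 - cs.length = 0 := by omega
      simp [h0]
  · next h =>
      have hlen : cs.length < 8 := by
        by_contra hc; exact h (by exact_mod_cast Nat.le_of_not_lt hc)
      match cs, hb with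
      | [], _ => simp
      | c :: rest, hb =>
          rcases hb c (by simp) with h' | h' <;> subst h' <;> simp

theorem pvZfill_spec (cs : List Char) (hb : pvIsBin cs) :
    pvVal (PySem.Chars.zfill cs 8) = pvVal cs ∧
    (PySem.Chars.zfill cs 8).length = max cs.length 8 ∧
    pvIsBin (PySem.Chars.zfill cs 8) := by
  rw [pvZfill_eq cs hb]
  refine ⟨pvVal_pad _ _, ?_, pvIsBin_append (pvIsBin_replicate_zero _) hb⟩
  simp; omega

-- bit flip: value complement
theorem pvValR_flip (r : List Char) (hb : pvIsBin r) :
    pvValR (r.map pvFlip) + pvValR r + 1 = 2 ^ r.length := by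
  induction r with
  | nil => simp [pvValR]
  | cons c t ih =>
      have ht := ih (fun x hx => hb x (by simp [hx]))
      rcases hb c (by simp) with h | h <;>
        subst h <;> simp [pvValR, pvFlip, pvBitc, pow_succ] <;> omega

theorem pvIsBin_flip (r : List Char) (hb : pvIsBin r) : pvIsBin (r.map pvFlip) := by
  intro c hc
  rcases List.mem_map.1 hc with ⟨x, hx, rfl⟩
  rcases hb x hx with h | h <;> simp [h, pvFlip]

-- the +1 loop
theorem pvIncAux_spec : ∀ (rl : List Char) (f : Nat), f ≤ 1 → pvIsBin rl →
    (pvIncAux rl f).1.length = rl.length ∧ pvIsBin (pvIncAux rl f).1 ∧ (pvIncAux rl f).2 ≤ 1 ∧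
    pvVal (pvIncAux rl f).1 + (pvIncAux rl f).2 * 2 ^ rl.length = pvValR rl + f := by
  intro rl
  induction rl with
  | nil =>
      intro f hf _
      exact ⟨rfl, by intro c hc; simp [pvIncAux] at hc, hf, by simp [pvIncAux, pvVal, pvValR]⟩
  | cons c t ih =>
      intro f hf hb
      have hbt : pvIsBin t := fun x hx => hb x (by simp [hx])
      have hstep : ∀ b f', (pvIncAux (c :: t) f) = ((pvIncAux t f').1 ++ [b], (pvIncAux t f').2) →
          pvBitc b + 2 * f' = pvBitc c + f → f' ≤ 1 → (b = '0' ∨ b = '1') →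
          (pvIncAux (c :: t) f).1.length = (c :: t).length ∧ pvIsBin (pvIncAux (c :: t) f).1 ∧
          (pvIncAux (c :: t) f).2 ≤ 1 ∧
          pvVal (pvIncAux (c :: t) f).1 + (pvIncAux (c :: t) f).2 * 2 ^ (c :: t).length
            = pvValR (c :: t) + f := by
        intro b f' heq hval hf' hbb
        obtain ⟨hl, hbin, hfo, hv⟩ := ih f' hf' hbt
        rw [heq]
        refine ⟨by simp [hl], pvIsBin_append hbin (by intro x hx; simp at hx; simp [hx, hbb]), hfo, ?_⟩
        rw [pvVal_append_singleton]
        simp only [List.length_cons, pvValR, pow_succ]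
        rcases Nat.le_one_iff_eq_zero_or_eq_one.mp hfo with hh | hh <;> rw [hh] at hv ⊢ <;> omega
      rcases hb c (by simp) with hc | hc <;> subst hc <;>
        by_cases hf1 : f = 1
      · exact hstep '1' 0 (by simp [pvIncAux, hf1]) (by simp [pvBitc, hf1]) (by omega) (by simp)
      · have hf0 : f = 0 := by omega
        exact hstep '0' 0 (by simp [pvIncAux, hf0]) (by simp [pvBitc, hf0]) (by omega) (by simp)
      · exact hstep '0' 1 (by simp [pvIncAux, hf1]) (by simp [pvBitc, hf1]) (by omega) (by simp)
      · have hf0 : f = 0 := by omega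
        exact hstep '1' 0 (by simp [pvIncAux, hf0]) (by simp [pvBitc, hf0]) (by omega) (by simp)


-- two's-complement conversion: binary, at least 8 chars, congruent to the input mod 256
theorem pvConvert_spec (n : Int) :
    pvIsBin (pvConvert n) ∧ 8 ≤ (pvConvert n).length ∧
    ((pvVal (pvConvert n) : Int) % 256 = n % 256) := by
  obtain ⟨hv0, hb0⟩ := pvBits_spec n.natAbs
  obtain ⟨hvr, hlr, hbr⟩ := pvZfill_spec (pvBitsAux n.natAbs []) hb0
  set r := PySem.Chars.zfill (pvBitsAux n.natAbs []) 8 with hrdef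
  have hlr8 : 8 ≤ r.length := by omega
  simp only [pvConvert]
  rw [← hrdef]
  by_cases hneg : n < 0
  · rw [if_pos hneg]
    -- inverted string
    have hbinv : pvIsBin (r.map pvFlip) := pvIsBin_flip r hbr
    have hflip : pvValR (r.reverse.map pvFlip) + pvValR r.reverse + 1 = 2 ^ r.length := by
      simpa using pvValR_flip r.reverse (pvIsBin_reverse hbr)
    have hinvval : pvVal (r.map pvFlip) + pvVal r + 1 = 2 ^ r.length := by
      show pvValR (r.map pvFlip).reverse + pvValR r.reverse + 1 = 2 ^ r.length
      rw [show (r.map pvFlip).reverse = r.reverse.map pvFlip from List.map_reverse.symm]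
      exact hflip
    obtain ⟨hil, hib, hif, hiv⟩ :=
      pvIncAux_spec (r.map pvFlip).reverse 1 (by omega) (pvIsBin_reverse hbinv)
    set p := pvIncAux (r.map pvFlip).reverse 1 with hpdef
    have hlen' : (r.map pvFlip).reverse.length = r.length := by simp
    have hm : n.natAbs ≥ 1 := by omega
    have hmval : pvVal r = n.natAbs := by omega
    have hvR : pvValR (r.map pvFlip).reverse = pvVal (r.map pvFlip) := rfl
    have hveq : pvVal p.1 + p.2 * 2 ^ r.length + n.natAbs = 2 ^ r.length := by
      rw [hlen'] at hiv
      have hlt := pvVal_lt r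
      omega
    have hp2 : p.2 = 0 := by
      have hlt1 : pvVal p.1 < 2 ^ r.length := by
        have := pvVal_lt p.1
        rw [hil, hlen'] at this
        exact this
      rcases Nat.le_one_iff_eq_zero_or_eq_one.mp hif with h | h
      · exact h
      · rw [h] at hveq; omega
    rw [hp2]
    simp only [if_neg (by omega : ¬ (0:Nat) = 1)]
    have hpl : p.1.length = r.length := by rw [hil, hlen']
    obtain ⟨hfv, hfl, hfb⟩ := pvZfill_spec p.1 hib
    refine ⟨hfb, by omega, ?_⟩
    rw [hfv]
    have hc : (pvVal p.1 : Int) + (n.natAbs : Int) = 2 ^ r.length := by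
      rw [hp2] at hveq
      exact_mod_cast (by omega : pvVal p.1 + n.natAbs = 2 ^ r.length)
    have h2len : (2:Int) ^ r.length = 256 * 2 ^ (r.length - 8) := by
      have : (2:Int) ^ r.length = 2 ^ 8 * 2 ^ (r.length - 8) := by
        rw [← pow_add]
        congr 1
        omega
      simpa using this
    have hna : (n.natAbs : Int) = -n := by omega
    rw [h2len] at hc
    omega
  · rw [if_neg hneg]
    obtain ⟨hfv, hfl, hfb⟩ := pvZfill_spec r hbr
    refine ⟨hfb, by omega, ?_⟩
    rw [hfv, hvr, hv0]
    have : (n.natAbs : Int) = n := by omega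
    rw [this]

-- ripple loop: accumulator-independence of the foldl
theorem pvFoldl_addStep (z : List (Char × Char)) : ∀ (acc : List Char) (c : Char),
    z.foldl pvAddStep (acc, c)
      = ((z.foldl pvAddStep ([], c)).1 ++ acc, (z.foldl pvAddStep ([], c)).2) := by
  induction z with
  | nil => simp
  | cons p t ih =>
      intro acc c
      simp only [List.foldl_cons, pvAddStep]
      rw [ih ((pvDigits p c).1 :: acc) (pvDigits p c).2,
          ih [(pvDigits p c).1] (pvDigits p c).2]
      simp

-- value carried by a list of digit pairs, least significant first
def pvPairsVal : List (Char × Char) → Nat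
  | [] => 0
  | p :: t => pvBitc p.1 + pvBitc p.2 + 2 * pvPairsVal t

theorem pvDigits_fact (p : Char × Char) (c : Char) :
    pvBitc (pvDigits p c).1 + 2 * pvBitc (pvDigits p c).2 = pvBitc p.1 + pvBitc p.2 + pvBitc c
    ∧ ((pvDigits p c).2 = '0' ∨ (pvDigits p c).2 = '1')
    ∧ ((pvDigits p c).1 = '0' ∨ (pvDigits p c).1 = '1') := by
  by_cases h1 : p.1 = '1' <;> by_cases h2 : p.2 = '1' <;> by_cases h3 : c = '1' <;>
    simp [pvDigits, pvBitc, h1, h2, h3]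

-- the ripple-carry loop computes the sum of the paired digit values
theorem pvAddLoop_spec : ∀ (z : List (Char × Char)) (c : Char), (c = '0' ∨ c = '1') →
    (z.foldl pvAddStep ([], c)).1.length = z.length ∧ pvIsBin (z.foldl pvAddStep ([], c)).1 ∧
    ((z.foldl pvAddStep ([], c)).2 = '0' ∨ (z.foldl pvAddStep ([], c)).2 = '1') ∧
    pvVal (z.foldl pvAddStep ([], c)).1 + pvBitc (z.foldl pvAddStep ([], c)).2 * 2 ^ z.length
      = pvPairsVal z + pvBitc c := by
  intro z
  induction z with
  | nil =>
      intro c hc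
      exact ⟨rfl, by intro x hx; simp at hx, hc, by simp [pvVal, pvValR, pvPairsVal]⟩
  | cons p t ih =>
      intro c hc
      obtain ⟨hdv, hdc, hdb⟩ := pvDigits_fact p c
      obtain ⟨hl, hb, hc2, hv⟩ := ih (pvDigits p c).2 hdc
      simp only [List.foldl_cons, pvAddStep]
      rw [pvFoldl_addStep t [(pvDigits p c).1] (pvDigits p c).2]
      refine ⟨by simp [hl], pvIsBin_append hb (by intro x hx; simp at hx; simp [hx, hdb]), hc2, ?_⟩
      rw [pvVal_append_singleton]
      simp only [List.length_cons, pvPairsVal, pow_succ]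
      rcases hc2 with h | h <;> rw [h] at hv ⊢ <;>
        simp only [pvBitc_one, pvBitc_zero] at hv ⊢ <;> omega

-- paired digit value of a zip = sum of the truncated digit values
theorem pvPairsVal_zip : ∀ (r1 r2 : List Char),
    pvPairsVal (r1.zip r2)
      = pvValR (r1.take (min r1.length r2.length)) + pvValR (r2.take (min r1.length r2.length)) := by
  intro r1
  induction r1 with
  | nil => intro r2; simp [pvPairsVal, pvValR]
  | cons a t1 ih =>
      intro r2
      cases r2 with
      | nil => simp [pvPairsVal, pvValR]
      | cons b t2 =>
          simp only [List.zip_cons_cons, pvPairsVal, List.length_cons,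
            Nat.succ_min_succ, List.take_succ_cons, pvValR, ih t2]
          ring

theorem pvValR_decomp (r : List Char) (L : Nat) (h : L ≤ r.length) :
    pvValR r = pvValR (r.take L) + 2 ^ L * pvValR (r.drop L) := by
  conv_lhs => rw [← List.take_append_drop L r]
  rw [pvValR_append, List.length_take, min_eq_left h]

-- B's bit tests produce exactly the 8-bit binary rendering
set_option maxRecDepth 8192 in
theorem pvAlt_val : ∀ n : Nat, n < 256 →
    pvVal (([(7:Int),6,5,4,3,2,1,0]).map
      (fun i => if PySem.Int.band (n : Int) (1 <<< i.toNat) ≠ 0 then '1' else '0')) = n := by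
  decide

theorem pvAlt_spec (t : Int) (h0 : 0 ≤ t) (h256 : t < 256) :
    ((PySem.List.pyRange 7 (-1) (-1)).map
      (fun i => if PySem.Int.band t (1 <<< i.toNat) ≠ 0 then '1' else '0')).length = 8 ∧
    pvIsBin ((PySem.List.pyRange 7 (-1) (-1)).map
      (fun i => if PySem.Int.band t (1 <<< i.toNat) ≠ 0 then '1' else '0')) ∧
    pvVal ((PySem.List.pyRange 7 (-1) (-1)).map
      (fun i => if PySem.Int.band t (1 <<< i.toNat) ≠ 0 then '1' else '0')) = t.toNat := by
  have hr : PySem.List.pyRange 7 (-1) (-1) = [7,6,5,4,3,2,1,0] := by decide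
  have ht : t = (t.toNat : Int) := (Int.toNat_of_nonneg h0).symm
  rw [hr]
  refine ⟨by simp, ?_, ?_⟩
  · intro c hc
    rcases List.mem_map.1 hc with ⟨x, _, rfl⟩
    split <;> simp
  · rw [ht]
    exact pvAlt_val t.toNat (by omega)

-- ===== VERDICT (by name: the statement is the Claim_ definition above) =====
theorem add_two_complements_spec : Claim_equal_add_two_complements := by
  intro a b mode _ hpre
  have hmode : mode = "twos_complement" := hpre
  subst hmode
  unfold Spec_add_two_complements
  simp only [add_two_complements, add_two_complements_alt, if_true]
  obtain ⟨hb1, hl1, hv1⟩ := pvConvert_spec a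
  obtain ⟨hb2, hl2, hv2⟩ := pvConvert_spec b
  set s1 := pvConvert a with hs1
  set s2 := pvConvert b with hs2
  set L := min s1.length s2.length with hL
  have hL8 : 8 ≤ L := le_min hl1 hl2
  set z := s1.reverse.zip s2.reverse with hz
  have hzlen : z.length = L := by simp [hz, hL]
  obtain ⟨hql, hqb, hqc, hqv⟩ := pvAddLoop_spec z '0' (Or.inl rfl)
  set q := z.foldl pvAddStep ([], '0') with hq
  rw [pvPairsVal_zip, show min s1.reverse.length s2.reverse.length = L by simp [hL]] at hqv
  have hd1 := pvValR_decomp s1.reverse L (by simp [hL])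
  have hd2 := pvValR_decomp s2.reverse L (by simp [hL])
  -- the sum string with the leading carry
  set sum := (if q.2 = '1' then '1' :: q.1 else q.1) with hsum
  have hsumb : pvIsBin sum := by
    rw [hsum]; split
    · intro c hc; rcases List.mem_cons.1 hc with h | h
      · right; exact h
      · exact hqb c h
    · exact hqb
  have hsv : pvVal sum = pvValR (s1.reverse.take L) + pvValR (s2.reverse.take L) := by
    rw [hzlen] at hqv
    rw [hsum]
    by_cases hcy : q.2 = '1'
    · rw [if_pos hcy, pvVal_cons, hql, hzlen]
      rw [hcy] at hqv
      simp only [pvBitc_one, pvBitc_zero] at hqv ⊢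
      omega
    · rw [if_neg hcy]
      have h0 : q.2 = '0' := hqc.resolve_right hcy
      rw [h0] at hqv
      simp only [pvBitc_zero] at hqv
      omega
  have hsuml : 8 ≤ sum.length ∧ sum.length ≤ L + 1 := by
    rw [hsum]; split <;> simp [hql, hzlen] <;> omega
  -- the final [-8:] slice
  rw [PySem.List.slice_from_neg_ofNat sum 8 (by omega)]
  set out := sum.drop (sum.length - 8) with hout
  have houtl : out.length = 8 := by rw [hout, List.length_drop]; omega
  have houtb : pvIsBin out := fun c hc => hsumb c (List.mem_of_mem_drop hc)
  have hrev : out.reverse = sum.reverse.take 8 := by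
    rw [hout, List.reverse_drop, show sum.length - (sum.length - 8) = 8 by omega]
  have houtv : pvVal sum = pvVal out + 256 * pvValR (sum.reverse.drop 8) := by
    have hdec := pvValR_decomp sum.reverse 8 (by simp; omega)
    show pvValR sum.reverse = _
    rw [hdec]
    have hto : pvVal out = pvValR (sum.reverse.take 8) := congrArg pvValR hrev
    rw [hto]
    norm_num
  -- Nat: the full conversion values differ from the output value by multiples of 256
  have hP : (2:Nat) ^ L = 256 * 2 ^ (L - 8) := by
    have : (2:Nat) ^ L = 2 ^ 8 * 2 ^ (L - 8) := by rw [← pow_add]; congr 1; omega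
    simpa using this
  have key : ∃ k, pvVal s1 + pvVal s2 = pvVal out + 256 * k := by
    obtain ⟨X1, hX1⟩ : ∃ x, pvValR s1.reverse = pvValR (s1.reverse.take L) + 256 * x :=
      ⟨2 ^ (L - 8) * pvValR (s1.reverse.drop L), by rw [hd1, hP]; ring⟩
    obtain ⟨X2, hX2⟩ : ∃ x, pvValR s2.reverse = pvValR (s2.reverse.take L) + 256 * x :=
      ⟨2 ^ (L - 8) * pvValR (s2.reverse.drop L), by rw [hd2, hP]; ring⟩
    have h2 : pvValR (s1.reverse.take L) + pvValR (s2.reverse.take L)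
        = pvVal out + 256 * pvValR (sum.reverse.drop 8) := by rw [← hsv]; exact houtv
    refine ⟨pvValR (sum.reverse.drop 8) + X1 + X2, ?_⟩
    show pvValR s1.reverse + pvValR s2.reverse = _
    omega
  -- move to Int and finish against B's value
  have hfin : (pvVal out : Int) = (a + b) % 256 := by
    have hlt : pvVal out < 256 := by
      have := pvVal_lt out
      rw [houtl] at this
      omega
    obtain ⟨k, hk⟩ := key
    have keyZ : (pvVal s1 : Int) + pvVal s2 = (pvVal out : Int) + 256 * (k : Int) := by
      exact_mod_cast hk
    omega
  -- B's side
  have hmod : PySem.Int.mod (a + b) 256 = (a + b) % 256 :=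
    PySem.Int.mod_eq_emod_of_pos (by omega)
  have h0t : 0 ≤ (a + b) % 256 := Int.emod_nonneg _ (by omega)
  have hlt' : (a + b) % 256 < 256 := Int.emod_lt_of_pos _ (by omega)
  obtain ⟨hal, hab, hav⟩ := pvAlt_spec ((a + b) % 256) h0t hlt'
  rw [hmod]
  refine congrArg String.ofList (pvVal_inj _ _ houtb hab (by rw [houtl, hal]) ?_)
  rw [hav]
  omega
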